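-- pv_equiv track=rewrite | github.com/eninn/codingtest_training | 카카오기출2024/주사위고르기.py | solution
-- ===== SOURCE A (Python) =====
-- from typing import List
-- from collections import defaultdict
-- from itertools import combinations
-- from bisect import bisect_left
--
-- def solution(dice:List[List[int]]):
--     answer = []
--
--     n = len(dice)
--
--     indices = range(n)
--     all_indices = set(indices)
--
--     best_combination = []
--     max_wins = -1
--
--     for a_indices in combinations(indices, n//2):
--         a_set = set(a_indices)
--         b_indices = tuple(all_indices - a_set)
--
--         a_sum_dict = get_sum_dict(a_indices, dice)
--         b_sum_dict = get_sum_dict(b_indices, dice)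
--
--         a_sorted_keys = sorted(a_sum_dict.keys())
--         b_sorted_keys = sorted(b_sum_dict.keys())
--
--         # b의 등장 가능한 점수를 오름차순으로 정렬한 후, (key, 누적등장횟수) 형태의 튜플리스트로 재작업한다.
--         current_sum = 0
--         cumulative_b_counts = []
--         for key in b_sorted_keys:
--             current_sum += b_sum_dict[key]
--             cumulative_b_counts.append((key, current_sum))
--
--         total_wins = 0
--         for a in a_sum_dict:
--             idx = bisect_left(b_sorted_keys, a)
--
--             if idx > 0:
--                 total_wins += a_sum_dict[a] * cumulative_b_counts[idx-1][1]
--             elif idx == 0: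
--                 continue
--
--         if max_wins < total_wins:
--             max_wins = total_wins
--             best_combination = a_indices
--
--     answer = [x+1 for x in best_combination]
--
--     return answer
--
-- def get_sum_dict(selected_indices, dice):
--     current_sums = {0: 1}
--
--     for idx in selected_indices:
--         next_sums = defaultdict(int)
--         for s in current_sums:
--             for face in dice[idx]:
--                 next_sums[s+face] += current_sums[s]
--         current_sums = next_sums
--
--     return current_sums
-- ===== SOURCE B (Python) =====
-- from typing import List
-- from itertools import combinations
--
-- def solution(dice: List[List[int]]):
--     n = len(dice)
--     best_combination = []
--     max_wins = -1
--     for a_indices in combinations(range(n), n // 2):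
--         b_indices = [i for i in range(n) if i not in a_indices]
--         a_outcomes = sorted(roll_sums(a_indices, dice))
--         b_outcomes = sorted(roll_sums(b_indices, dice))
--         # merge pass: j = number of b outcomes strictly below the current a outcome
--         wins = 0
--         j = 0
--         for a in a_outcomes:
--             while j < len(b_outcomes) and b_outcomes[j] < a:
--                 j += 1
--             wins += j
--         if max_wins < wins:
--             max_wins = wins
--             best_combination = a_indices
--     return [x + 1 for x in best_combination]
--
-- def roll_sums(selected_indices, dice):
--     sums = [0]
--     for idx in selected_indices:
--         sums = [s + face for s in sums for face in dice[idx]]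
--     return sums
-- ===== Notes on version B (the rewrite author's own statement) =====
-- stated objective: alternative
-- what changed: Replaces the dict-based sum-count convolution plus per-key bisect over cumulative counts with a flat enumeration of all outcome sums, sorting both sides and one two-pointer merge pass that adds, for each outcome of A's dice, the number of opponent outcomes strictly below it.
import Mathlib
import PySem

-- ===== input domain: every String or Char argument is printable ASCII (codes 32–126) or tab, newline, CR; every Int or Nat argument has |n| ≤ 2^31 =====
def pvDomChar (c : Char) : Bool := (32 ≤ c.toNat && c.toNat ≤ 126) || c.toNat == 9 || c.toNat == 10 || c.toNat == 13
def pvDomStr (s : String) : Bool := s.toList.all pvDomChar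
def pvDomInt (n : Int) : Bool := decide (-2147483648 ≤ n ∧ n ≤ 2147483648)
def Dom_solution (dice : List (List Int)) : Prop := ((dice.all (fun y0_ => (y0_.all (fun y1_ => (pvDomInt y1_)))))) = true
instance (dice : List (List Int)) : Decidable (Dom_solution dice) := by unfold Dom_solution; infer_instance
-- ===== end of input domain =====

-- B replaces A's dict convolution + bisect/cumulative-count win counting by flat outcome
-- enumeration, sorting and a two-pointer merge; same return value on every input (alternative).

-- ===== PORT A =====
-- get_sum_dict: dict DP convolution {0:1} extended die by die (defaultdict += becomes modify)
def getSumDict (sel : List Int) (dice : List (List Int)) : PySem.Dict Int Int :=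
  sel.foldl
    (fun cur idx =>
      cur.keys.foldl
        (fun nd s =>
          (PySem.List.pyGetD dice idx []).foldl
            (fun nd face => nd.modify (s + face) 0 (· + cur.getD s 0))
            nd)
        PySem.Dict.empty)
    (PySem.Dict.empty.insert 0 1)

-- loop body of A: compute both dicts, cumulative counts of b, bisect per a-key, track best
def stepA (dice : List (List Int)) (allIndices : PySem.Set Int)
    (st : List Int × Int) (aIndices : List Int) : List Int × Int :=
  let aSet : PySem.Set Int := PySem.Set.ofList aIndices
  let bIndices : List Int := PySem.Set.diff allIndices aSet
  let aSumDict := getSumDict aIndices dice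
  let bSumDict := getSumDict bIndices dice
  let _aSortedKeys := PySem.List.sorted aSumDict.keys (fun k => k)
  let bSortedKeys := PySem.List.sorted bSumDict.keys (fun k => k)
  let cum := (bSortedKeys.foldl
      (fun (p : Int × List (Int × Int)) key =>
        let c := p.1 + bSumDict.getD key 0
        (c, p.2 ++ [(key, c)]))
      (0, [])).2
  let totalWins := aSumDict.keys.foldl
      (fun tw a =>
        let idx := PySem.List.bisectLeft bSortedKeys a
        if 0 < idx then tw + aSumDict.getD a 0 * (cum.getD (idx - 1) (0, 0)).2
        else tw)
      0
  if st.2 < totalWins then (aIndices, totalWins) else st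

def solution (dice : List (List Int)) : List Int :=
  let n : Int := (dice.length : Int)
  let indices := PySem.List.pyRange 0 n 1
  let allIndices : PySem.Set Int := PySem.Set.ofList indices
  let final :=
    (PySem.List.combinations indices (PySem.Int.floordiv n 2).toNat).foldl
      (stepA dice allIndices) ([], -1)
  final.1.map (· + 1)

-- ===== PORT B =====
-- roll_sums: flat list of all outcome sums of the selected dice
def rollSums (sel : List Int) (dice : List (List Int)) : List Int :=
  sel.foldl
    (fun sums idx => sums.flatMap (fun s => (PySem.List.pyGetD dice idx []).map (fun f => s + f)))
    [0]

-- the inner 'while' of the merge pass: advance j while b_outcomes[j] < a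
def advance (b : List Int) (a : Int) (j : Nat) : Nat :=
  if h : j < b.length then
    if b[j] < a then advance b a (j + 1) else j
  else j
termination_by b.length - j

-- loop body of B: sorted flat outcome lists, two-pointer merge, track best
def stepB (dice : List (List Int)) (indices : List Int)
    (st : List Int × Int) (aIndices : List Int) : List Int × Int :=
  let bIndices := indices.filter (fun i => !aIndices.contains i)
  let aOut := PySem.List.sorted (rollSums aIndices dice) (fun x => x)
  let bOut := PySem.List.sorted (rollSums bIndices dice) (fun x => x)
  let wj := aOut.foldl
      (fun (p : Int × Nat) a =>
        let j := advance bOut a p.2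
        (p.1 + (j : Int), j))
      (0, 0)
  if st.2 < wj.1 then (aIndices, wj.1) else st

def solution_alt (dice : List (List Int)) : List Int :=
  let n : Int := (dice.length : Int)
  let indices := PySem.List.pyRange 0 n 1
  let final :=
    (PySem.List.combinations indices (PySem.Int.floordiv n 2).toNat).foldl
      (stepB dice indices) ([], -1)
  final.1.map (· + 1)

-- ===== PRECONDITION & SPEC =====
def Spec_solution (dice : List (List Int)) (out : List Int) : Prop := out = solution_alt dice
instance (dice : List (List Int)) (out : List Int) : Decidable (Spec_solution dice out) := by unfold Spec_solution; infer_instance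

-- ===== CLAIM (what is proved, stated in full; the proofs are below) =====
def Claim_equal_solution : Prop := ∀ (dice : List (List Int)), Dom_solution dice → Spec_solution dice (solution dice)



-- ===== LEMMAS AND PROOFS =====

-- ---- dict lemmas: the DP dict stores exactly the multiplicities of the flat outcome list ----

lemma innerFold_getD (faces : List Int) (s c v : Int) (d : PySem.Dict Int Int) :
    (faces.foldl (fun nd f => nd.modify (s + f) 0 (· + c)) d).getD v 0
      = d.getD v 0 + c * (faces.countP (fun f => s + f == v) : Int) := by
  induction faces generalizing d with
  | nil => simp
  | cons f t ih =>
    simp only [List.foldl_cons, ih, PySem.Dict.getD_modify, List.countP_cons]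
    by_cases h : v = s + f
    · subst h
      have hb : (s + f == s + f) = true := by simp
      simp only [hb, if_true]
      push_cast
      ring
    · have hb : (s + f == v) = false := by simp [Ne.symm h]
      simp [h, hb]

lemma outerFold_getD (ks faces : List Int) (cf : Int → Int) (d : PySem.Dict Int Int) (v : Int) :
    (ks.foldl (fun nd s => faces.foldl (fun nd f => nd.modify (s + f) 0 (· + cf s)) nd) d).getD v 0
      = d.getD v 0 + (ks.map (fun s => cf s * (faces.countP (fun f => s + f == v) : Int))).sum := by
  induction ks generalizing d with
  | nil => simp
  | cons s t ih =>
    simp only [List.foldl_cons, ih, innerFold_getD, List.map_cons, List.sum_cons]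
    ring

lemma outerFold_nodup (ks faces : List Int) (cf : Int → Int) (d : PySem.Dict Int Int)
    (h : d.keys.Nodup) :
    (ks.foldl (fun nd s => faces.foldl (fun nd f => nd.modify (s + f) 0 (· + cf s)) nd) d).keys.Nodup := by
  induction ks generalizing d with
  | nil => exact h
  | cons s t ih =>
    simp only [List.foldl_cons]
    exact ih _ (PySem.Dict.nodup_keys_foldl_modify_key faces (fun f => s + f) 0
      (fun _ _ => (· + cf s)) d h)

def DictRel (d : PySem.Dict Int Int) (outs : List Int) : Prop :=
  d.keys.Nodup ∧ ∀ v : Int, d.getD v 0 = (outs.count v : Int)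

lemma getD_zero_of_not_mem_keys (d : PySem.Dict Int Int) (v : Int) (h : v ∉ d.keys) :
    d.getD v 0 = 0 := by
  have hc : d.contains v = false := by
    by_contra hcc
    exact h ((PySem.Dict.contains_iff_mem_keys d v).mp (by simpa using hcc))
  have hn : d.get? v = none := (PySem.Dict.get?_eq_none_iff_contains d v).mpr hc
  simp [PySem.Dict.getD, hn]

lemma mem_keys_of_mem_outs {d : PySem.Dict Int Int} {outs : List Int}
    (h : DictRel d outs) {x : Int} (hx : x ∈ outs) : x ∈ d.keys := by
  by_contra hmem
  have h0 : d.getD x 0 = 0 := getD_zero_of_not_mem_keys d x hmem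
  have hcount : (0 : Int) < (outs.count x : Int) := by
    exact_mod_cast List.count_pos_iff.mpr hx
  rw [h.2 x] at h0
  omega

lemma count_flatMap_int (l : List Int) (g : Int → List Int) (v : Int) :
    (((l.flatMap g).count v : Nat) : Int) = (l.map (fun s => ((g s).count v : Int))).sum := by
  induction l with
  | nil => simp
  | cons s t ih =>
    simp only [List.flatMap_cons, List.count_append, List.map_cons, List.sum_cons, ← ih]
    push_cast
    ring

-- ---- weighted covering sum: summing count(k)·g(k) over a nodup covering key list ----

lemma sum_single_int (K : List Int) (g : Int → Int) (x : Int) (hK : K.Nodup) (hx : x ∈ K) :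
    (K.map (fun k => if x = k then g k else 0)).sum = g x := by
  induction K with
  | nil => cases hx
  | cons k t ih =>
    rcases List.mem_cons.mp hx with hxk | hxt
    · subst hxk
      have hnot : x ∉ t := (List.nodup_cons.mp hK).1
      have hzero : (t.map (fun k => if x = k then g k else 0)).sum = 0 := by
        apply List.sum_eq_zero
        intro y hy
        obtain ⟨k', hk', hky⟩ := List.mem_map.mp hy
        have hne : ¬ x = k' := fun he => hnot (he ▸ hk')
        simpa [hne] using hky.symm
      simp [hzero]
    · have hne : ¬ x = k := by
        intro he
        exact (List.nodup_cons.mp hK).1 (he ▸ hxt)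
      simp only [List.map_cons, List.sum_cons, if_neg hne, zero_add]
      exact ih (List.nodup_cons.mp hK).2 hxt

lemma sum_count_mul_eq (K : List Int) (g : Int → Int) :
    ∀ (l : List Int), K.Nodup → (∀ x ∈ l, x ∈ K) →
      (K.map (fun k => (l.count k : Int) * g k)).sum = (l.map g).sum := by
  intro l
  induction l with
  | nil => intro _ _; simp
  | cons x t ih =>
    intro hK hcov
    have h1 : (K.map (fun k => ((x :: t).count k : Int) * g k)).sum
        = (K.map (fun k => (t.count k : Int) * g k + (if x = k then g k else 0))).sum := by
      apply congrArg
      apply List.map_congr_left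
      intro k _
      rw [List.count_cons]
      by_cases h : x = k
      · simp [h]; ring
      · have hb : (x == k) = false := by simp [h]
        simp [hb, h]
    rw [h1, PySem.List.sum_map_add_int, ih hK (fun y hy => hcov y (List.mem_cons_of_mem x hy)),
      sum_single_int K g x hK (hcov x List.mem_cons_self)]
    simp [add_comm]

-- ---- the DP step and induction ----

lemma dictRel_step (dice : List (List Int)) (idx : Int) (d : PySem.Dict Int Int) (outs : List Int)
    (h : DictRel d outs) :
    DictRel
      (d.keys.foldl (fun nd s => (PySem.List.pyGetD dice idx []).foldl
        (fun nd face => nd.modify (s + face) 0 (· + d.getD s 0)) nd) PySem.Dict.empty)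
      (outs.flatMap (fun s => (PySem.List.pyGetD dice idx []).map (fun f => s + f))) := by
  constructor
  · exact outerFold_nodup d.keys _ (fun s => d.getD s 0) PySem.Dict.empty
      (by simp [PySem.Dict.keys_empty])
  · intro v
    rw [outerFold_getD]
    have hempty : (PySem.Dict.empty : PySem.Dict Int Int).getD v 0 = 0 := by
      simp [PySem.Dict.getD_empty]
    rw [hempty, zero_add]
    have hmap : (d.keys.map (fun s => d.getD s 0
          * ((PySem.List.pyGetD dice idx []).countP (fun f => s + f == v) : Int))).sum
        = (d.keys.map (fun s => ((outs.count s : Nat) : Int)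
          * ((PySem.List.pyGetD dice idx []).countP (fun f => s + f == v) : Int))).sum := by
      apply congrArg; apply List.map_congr_left; intro s _; rw [h.2 s]
    rw [hmap, sum_count_mul_eq d.keys _ outs h.1 (fun x hx => mem_keys_of_mem_outs h hx),
      count_flatMap_int]
    apply congrArg; apply List.map_congr_left; intro s _
    have : ((PySem.List.pyGetD dice idx []).map (fun f => s + f)).count v
        = (PySem.List.pyGetD dice idx []).countP (fun f => s + f == v) := by
      rw [List.count_eq_countP, List.countP_map]
      rfl
    rw [this]

lemma dictRel_fold (dice : List (List Int)) :
    ∀ (sel : List Int) (d : PySem.Dict Int Int) (outs : List Int), DictRel d outs →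
      DictRel
        (sel.foldl (fun cur idx => cur.keys.foldl (fun nd s =>
            (PySem.List.pyGetD dice idx []).foldl
              (fun nd face => nd.modify (s + face) 0 (· + cur.getD s 0)) nd) PySem.Dict.empty) d)
        (sel.foldl (fun sums idx =>
            sums.flatMap (fun s => (PySem.List.pyGetD dice idx []).map (fun f => s + f))) outs) := by
  intro sel
  induction sel with
  | nil => intro d outs h; exact h
  | cons idx t ih =>
    intro d outs h
    simp only [List.foldl_cons]
    exact ih _ _ (dictRel_step dice idx d outs h)

lemma dictRel_getSumDict (sel : List Int) (dice : List (List Int)) :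
    DictRel (getSumDict sel dice) (rollSums sel dice) := by
  unfold getSumDict rollSums
  apply dictRel_fold
  constructor
  · exact PySem.Dict.nodup_keys_insert _ 0 1 PySem.Dict.nodup_keys_empty
  · intro v
    rw [PySem.Dict.getD_insert]
    by_cases h : v = 0
    · simp [h]
    · have hb : ((0 : Int) == v) = false := by simp [Ne.symm h]
      simp [h, List.count_cons, hb]

-- ---- bisect on a sorted list counts the elements strictly below ----

lemma take_bisect (b : List Int) (a : Int) (hs : b.Pairwise (· ≤ ·)) :
    b.take (PySem.List.bisectLeft b a) = b.filter (fun k => k < a) := by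
  obtain ⟨hle, hlt, hge⟩ := PySem.List.bisectLeft_spec b a hs
  have htake : (b.take (PySem.List.bisectLeft b a)).filter (fun k => k < a)
      = b.take (PySem.List.bisectLeft b a) := by
    apply List.filter_eq_self.mpr
    intro y hy
    obtain ⟨i, hi, hiy⟩ := List.mem_iff_getElem.mp hy
    have hilen : i < b.length := by
      have h2 := hi
      simp only [List.length_take] at h2
      omega
    have hij : i < PySem.List.bisectLeft b a := by
      have h2 := hi
      simp only [List.length_take] at h2
      omega
    have hlt' : b[i] < a := hlt i hilen hij
    rw [List.getElem_take] at hiy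
    simp [← hiy, hlt']
  have hdrop : (b.drop (PySem.List.bisectLeft b a)).filter (fun k => k < a) = [] := by
    apply List.filter_eq_nil_iff.mpr
    intro y hy
    obtain ⟨i, hi, hiy⟩ := List.mem_iff_getElem.mp hy
    have hilen : PySem.List.bisectLeft b a + i < b.length := by
      have h2 := hi
      simp only [List.length_drop] at h2
      omega
    have hya : a ≤ b[PySem.List.bisectLeft b a + i] := hge _ hilen (by omega)
    rw [List.getElem_drop] at hiy
    simp only [decide_eq_true_eq]
    omega
  conv_rhs => rw [← List.take_append_drop (PySem.List.bisectLeft b a) b]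
  rw [List.filter_append, htake, hdrop, List.append_nil]

lemma countP_eq_bisect (b : List Int) (a : Int) (hs : b.Pairwise (· ≤ ·)) :
    b.countP (fun k => k < a) = PySem.List.bisectLeft b a := by
  obtain ⟨hle, _, _⟩ := PySem.List.bisectLeft_spec b a hs
  rw [List.countP_eq_length_filter, ← take_bisect b a hs, List.length_take]
  omega

-- ---- the while-loop 'advance' reaches exactly the bisect point ----

lemma advance_eq (b : List Int) (a : Int) (hs : b.Pairwise (· ≤ ·)) (j : Nat)
    (hj : j ≤ PySem.List.bisectLeft b a) : advance b a j = PySem.List.bisectLeft b a := by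
  obtain ⟨hle, hlt, hge⟩ := PySem.List.bisectLeft_spec b a hs
  suffices H : ∀ k j, j ≤ PySem.List.bisectLeft b a → PySem.List.bisectLeft b a - j = k →
      advance b a j = PySem.List.bisectLeft b a from H _ j hj rfl
  intro k
  induction k with
  | zero =>
    intro j hj hk
    have hjC : j = PySem.List.bisectLeft b a := by omega
    rw [advance]
    by_cases hlen : j < b.length
    · have hya : a ≤ b[j] := hge j hlen (by omega)
      rw [dif_pos hlen, if_neg (by omega)]
      exact hjC
    · rw [dif_neg hlen]
      exact hjC
  | succ k ihk =>
    intro j hj hk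
    have hjC : j < PySem.List.bisectLeft b a := by omega
    have hjlen : j < b.length := lt_of_lt_of_le hjC hle
    rw [advance, dif_pos hjlen, if_pos (hlt j hjlen hjC)]
    exact ihk (j + 1) (by omega) (by omega)

lemma bisect_mono (b : List Int) (hs : b.Pairwise (· ≤ ·)) (a a' : Int) (h : a ≤ a') :
    PySem.List.bisectLeft b a ≤ PySem.List.bisectLeft b a' := by
  rw [← countP_eq_bisect b a hs, ← countP_eq_bisect b a' hs]
  exact List.countP_mono_left (fun x _ hx => by
    simp only [decide_eq_true_eq] at hx ⊢
    omega)

lemma merge_fold (bOut : List Int) (hs : bOut.Pairwise (· ≤ ·)) :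
    ∀ (as_ : List Int), as_.Pairwise (· ≤ ·) → ∀ (w : Int) (j : Nat),
      (∀ a ∈ as_, j ≤ PySem.List.bisectLeft bOut a) →
      (as_.foldl
          (fun (p : Int × Nat) a =>
            (p.1 + (advance bOut a p.2 : Int), advance bOut a p.2))
          (w, j)).1
        = w + (as_.map (fun a => (PySem.List.bisectLeft bOut a : Int))).sum := by
  intro as_
  induction as_ with
  | nil => intro _ w j _; simp
  | cons a t ih =>
    intro hp w j hj
    obtain ⟨ha, ht⟩ := List.pairwise_cons.mp hp
    have hadv : advance bOut a j = PySem.List.bisectLeft bOut a :=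
      advance_eq bOut a hs j (hj a List.mem_cons_self)
    simp only [List.foldl_cons, hadv]
    rw [ih ht (w + (PySem.List.bisectLeft bOut a : Int)) (PySem.List.bisectLeft bOut a)
      (fun a' ha' => bisect_mono bOut hs a a' (ha a' ha'))]
    simp only [List.map_cons, List.sum_cons]
    ring

-- ---- the cumulative-count list A builds ----

def prefixes (g : Int → Int) : List Int → Int → List (Int × Int)
  | [], _ => []
  | k :: t, c => (k, c + g k) :: prefixes g t (c + g k)

lemma cum_eq (g : Int → Int) (bs : List Int) (c0 : Int) (acc : List (Int × Int)) :
    (bs.foldl (fun (p : Int × List (Int × Int)) key =>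
        let c := p.1 + g key
        (c, p.2 ++ [(key, c)])) (c0, acc)).2
      = acc ++ prefixes g bs c0 := by
  induction bs generalizing c0 acc with
  | nil => simp [prefixes]
  | cons k t ih =>
    simp only [List.foldl_cons, prefixes, ih]
    simp

lemma prefixes_getD (g : Int → Int) (bs : List Int) (c0 : Int) (i : Nat) (hi : i < bs.length) :
    (prefixes g bs c0).getD i (0, 0) = (bs[i], c0 + ((bs.take (i + 1)).map g).sum) := by
  induction bs generalizing c0 i with
  | nil => simp at hi
  | cons k t ih =>
    cases i with
    | zero => simp [prefixes]
    | succ i =>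
      have hi' : i < t.length := by simpa using hi
      simp only [prefixes, List.getD_cons_succ, ih (c0 + g k) i hi', List.take_succ_cons,
        List.map_cons, List.sum_cons, List.getElem_cons_succ]
      rw [Prod.mk.injEq]
      exact ⟨rfl, by ring⟩

-- ---- both loop bodies compute the same number of wins ----

lemma wins_eq (dice : List (List Int)) (aIdx bIdx : List Int) :
    (let aSumDict := getSumDict aIdx dice
     let bSumDict := getSumDict bIdx dice
     let bSortedKeys := PySem.List.sorted bSumDict.keys (fun k => k)
     let cum := (bSortedKeys.foldl
         (fun (p : Int × List (Int × Int)) key =>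
           let c := p.1 + bSumDict.getD key 0
           (c, p.2 ++ [(key, c)])) (0, [])).2
     aSumDict.keys.foldl
       (fun tw a =>
         let idx := PySem.List.bisectLeft bSortedKeys a
         if 0 < idx then tw + aSumDict.getD a 0 * (cum.getD (idx - 1) (0, 0)).2
         else tw)
       0)
    = (let aOut := PySem.List.sorted (rollSums aIdx dice) (fun x => x)
       let bOut := PySem.List.sorted (rollSums bIdx dice) (fun x => x)
       (aOut.foldl
         (fun (p : Int × Nat) a =>
           let j := advance bOut a p.2
           (p.1 + (j : Int), j))
         (0, 0)).1) := by
  simp only []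
  set da := getSumDict aIdx dice with hda
  set db := getSumDict bIdx dice with hdb
  set aouts := rollSums aIdx dice with haouts
  set bouts := rollSums bIdx dice with hbouts
  set bs := PySem.List.sorted db.keys (fun k => k) with hbs
  have hra : DictRel da aouts := dictRel_getSumDict aIdx dice
  have hrb : DictRel db bouts := dictRel_getSumDict bIdx dice
  have hbs_pair : bs.Pairwise (· ≤ ·) := PySem.List.sorted_pairwise db.keys (fun k => k)
  have hbs_nodup : bs.Nodup :=
    ((PySem.List.sorted_perm db.keys (fun k => k) false).nodup_iff).mpr hrb.1
  have hbelow : ∀ a : Int,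
      (((bs.take (PySem.List.bisectLeft bs a)).map (fun k => db.getD k 0)).sum)
        = (bouts.countP (fun k => k < a) : Int) := by
    intro a
    rw [take_bisect bs a hbs_pair]
    have hcongr : ((bs.filter (fun k => k < a)).map (fun k => db.getD k 0)).sum
        = ((bs.filter (fun k => k < a)).map
            (fun k => (((bouts.filter (fun x => x < a)).count k : Nat) : Int) * 1)).sum := by
      apply congrArg
      apply List.map_congr_left
      intro k hk
      have hka : k < a := by
        have h2 := List.of_mem_filter hk
        simpa using h2
      rw [hrb.2 k, List.count_filter (by simpa using hka)]
      ring
    rw [hcongr, sum_count_mul_eq _ _ _ (hbs_nodup.filter _)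
      (fun x hx => by
        have hxb : x ∈ bouts := List.mem_of_mem_filter hx
        have hxa : x < a := by
          have h2 := List.of_mem_filter hx
          simpa using h2
        exact List.mem_filter.mpr ⟨(PySem.List.mem_sorted db.keys (fun k => k) false x).mpr
          (mem_keys_of_mem_outs hrb hxb), by simpa using hxa⟩)]
    rw [List.countP_eq_length_filter, PySem.List.sum_map_const_int]
    ring
  have hcum : (bs.foldl (fun (p : Int × List (Int × Int)) key =>
      (p.1 + db.getD key 0, p.2 ++ [(key, p.1 + db.getD key 0)])) (0, [])).2
      = prefixes (fun k => db.getD k 0) bs 0 := by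
    have h2 := cum_eq (fun k => db.getD k 0) bs 0 []
    simpa using h2
  have hbodyA : ∀ (tw a : Int),
      (if 0 < PySem.List.bisectLeft bs a then tw + da.getD a 0 *
         (((bs.foldl (fun (p : Int × List (Int × Int)) key =>
             (p.1 + db.getD key 0, p.2 ++ [(key, p.1 + db.getD key 0)])) (0, [])).2).getD
               (PySem.List.bisectLeft bs a - 1) (0, 0)).2
       else tw)
      = tw + da.getD a 0 * (bouts.countP (fun k => k < a) : Int) := by
    intro tw a
    rw [hcum]
    obtain ⟨hle, _, _⟩ := PySem.List.bisectLeft_spec bs a hbs_pair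
    by_cases hpos : 0 < PySem.List.bisectLeft bs a
    · rw [if_pos hpos]
      have hidx : PySem.List.bisectLeft bs a - 1 < bs.length := by omega
      rw [prefixes_getD (fun k => db.getD k 0) bs 0 _ hidx]
      have hsucc : PySem.List.bisectLeft bs a - 1 + 1 = PySem.List.bisectLeft bs a := by omega
      rw [hsucc, ← hbelow a]
      simp
    · rw [if_neg hpos]
      have h0 : PySem.List.bisectLeft bs a = 0 := by omega
      have hz : (bouts.countP (fun k => k < a) : Int) = 0 := by
        rw [← hbelow a, h0]
        simp
      rw [hz]
      ring
  have hA : (da.keys.foldl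
      (fun tw a =>
        if 0 < PySem.List.bisectLeft bs a then tw + da.getD a 0 *
          (((bs.foldl (fun (p : Int × List (Int × Int)) key =>
              (p.1 + db.getD key 0, p.2 ++ [(key, p.1 + db.getD key 0)])) (0, [])).2).getD
                (PySem.List.bisectLeft bs a - 1) (0, 0)).2
        else tw) 0)
      = (aouts.map (fun x => (bouts.countP (fun k => k < x) : Int))).sum := by
    rw [PySem.List.foldl_congr_mem _ _
      (fun tw a => tw + da.getD a 0 * (bouts.countP (fun k => k < a) : Int)) 0
      (fun tw a _ => hbodyA tw a)]
    rw [PySem.List.foldl_add]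
    have h3 : (da.keys.map (fun a => da.getD a 0 * (bouts.countP (fun k => k < a) : Int))).sum
        = (da.keys.map (fun a => ((aouts.count a : Nat) : Int)
            * (bouts.countP (fun k => k < a) : Int))).sum := by
      apply congrArg; apply List.map_congr_left
      intro a _
      rw [hra.2 a]
    rw [h3, sum_count_mul_eq da.keys _ aouts hra.1 (fun x hx => mem_keys_of_mem_outs hra hx)]
    simp
  have hsa_pair : (PySem.List.sorted aouts (fun x => x)).Pairwise (· ≤ ·) :=
    PySem.List.sorted_pairwise aouts (fun x => x)
  have hsb_pair : (PySem.List.sorted bouts (fun x => x)).Pairwise (· ≤ ·) :=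
    PySem.List.sorted_pairwise bouts (fun x => x)
  have hB : ((PySem.List.sorted aouts (fun x => x)).foldl
      (fun (p : Int × Nat) a =>
        (p.1 + (advance (PySem.List.sorted bouts (fun x => x)) a p.2 : Int),
          advance (PySem.List.sorted bouts (fun x => x)) a p.2)) ((0 : Int), (0 : Nat))).1
      = (aouts.map (fun x => (bouts.countP (fun k => k < x) : Int))).sum := by
    rw [merge_fold _ hsb_pair _ hsa_pair 0 0 (fun _ _ => Nat.zero_le _)]
    have hmapeq : ((PySem.List.sorted aouts (fun x => x)).map
          (fun a => (PySem.List.bisectLeft (PySem.List.sorted bouts (fun x => x)) a : Int)))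
        = ((PySem.List.sorted aouts (fun x => x)).map
          (fun a => (bouts.countP (fun k => k < a) : Int))) := by
      apply List.map_congr_left
      intro a _
      rw [← countP_eq_bisect _ a hsb_pair]
      congr 1
      exact (PySem.List.sorted_perm bouts (fun x => x) false).countP_eq _
    rw [hmapeq]
    have hperm : ((PySem.List.sorted aouts (fun x => x)).map
          (fun a => (bouts.countP (fun k => k < a) : Int))).Perm
        (aouts.map (fun a => (bouts.countP (fun k => k < a) : Int))) :=
      (PySem.List.sorted_perm aouts (fun x => x) false).map _
    rw [hperm.sum_eq]
    simp
  rw [hA]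
  exact hB.symm

-- ---- A's set difference is B's filtered range ----

lemma bIndices_eq (n : Int) (c : List Int) :
    PySem.Set.diff (PySem.Set.ofList (PySem.List.pyRange 0 n 1)) (PySem.Set.ofList c)
      = (PySem.List.pyRange 0 n 1).filter (fun i => !c.contains i) := by
  rw [PySem.Set.ofList_eq_self_of_nodup _ (PySem.List.nodup_pyRange_one 0 n)]
  show (PySem.List.pyRange 0 n 1).filter (fun x => !(PySem.Set.ofList c).contains x)
      = (PySem.List.pyRange 0 n 1).filter (fun i => !c.contains i)
  apply List.filter_congr
  intro x _
  have h2 : (PySem.Set.ofList c).contains x = c.contains x := by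
    rw [Bool.eq_iff_iff]
    simp only [List.contains_iff_mem]
    exact (PySem.Set.contains_iff _ _).trans (PySem.Set.mem_ofList c x)
  rw [h2]

lemma stepA_eq_stepB (dice : List (List Int)) (n : Int) (st : List Int × Int) (c : List Int) :
    stepA dice (PySem.Set.ofList (PySem.List.pyRange 0 n 1)) st c
      = stepB dice (PySem.List.pyRange 0 n 1) st c := by
  have hw := wins_eq dice c ((PySem.List.pyRange 0 n 1).filter (fun i => !c.contains i))
  simp only [] at hw
  simp only [stepA, stepB, bIndices_eq n c, hw]

-- ===== VERDICT (by name: the statement is the Claim_ definition above) =====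
theorem solution_spec : Claim_equal_solution := by
  intro dice _
  unfold Spec_solution solution solution_alt
  simp only []
  rw [PySem.List.foldl_congr_mem _ _ (stepB dice (PySem.List.pyRange 0 (dice.length : Int) 1))
    ([], -1) (fun st c _ => stepA_eq_stepB dice (dice.length : Int) st c)]
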